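-- pv_equiv track=rewrite | github.com/ellipszist/justhireme | backend/profile/portfolio_ingestor.py | _is_concatenated_nav
-- ===== SOURCE A (Python) =====
-- def _is_concatenated_nav(value: str) -> bool:
--     if not value or len(value) > 80:
--         return False
--     tokens = ("home", "about", "projects", "project", "work", "portfolio", "contact", "resume", "blog", "menu", "github", "linkedin")
--     remaining = value
--     hits = 0
--     while remaining:
--         match = next((token for token in tokens if remaining.startswith(token)), "")
--         if not match:
--             return False
--         remaining = remaining[len(match):]
--         hits += 1
--     return hits >= 2
-- ===== SOURCE B (Python) =====
-- def _is_concatenated_nav(value: str) -> bool: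
--     if not value or len(value) > 80:
--         return False
--     tokens = ("home", "about", "projects", "project", "work", "portfolio", "contact", "resume", "blog", "menu", "github", "linkedin")
--     n = len(value)
--     # dp[i] = minimal number of tokens whose concatenation is value[:i], or None
--     dp = [0]
--     for i in range(1, n + 1):
--         best = None
--         for t in tokens:
--             L = len(t)
--             if i >= L and value[i - L:i] == t:
--                 prev = dp[i - L]
--                 if prev is not None:
--                     cand = prev + 1
--                     if best is None or cand < best:
--                         best = cand
--         dp.append(best)
--     return dp[n] is not None and dp[n] >= 2
-- ===== Notes on version B (the rewrite author's own statement) =====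
-- stated objective: alternative
-- what changed: Replaces A's greedy prefix-stripping while-loop with a word-break dynamic program that tabulates the minimal token count for every prefix and tests dp[n] >= 2 (results coincide because the token set admits at most one segmentation).
import Mathlib
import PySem

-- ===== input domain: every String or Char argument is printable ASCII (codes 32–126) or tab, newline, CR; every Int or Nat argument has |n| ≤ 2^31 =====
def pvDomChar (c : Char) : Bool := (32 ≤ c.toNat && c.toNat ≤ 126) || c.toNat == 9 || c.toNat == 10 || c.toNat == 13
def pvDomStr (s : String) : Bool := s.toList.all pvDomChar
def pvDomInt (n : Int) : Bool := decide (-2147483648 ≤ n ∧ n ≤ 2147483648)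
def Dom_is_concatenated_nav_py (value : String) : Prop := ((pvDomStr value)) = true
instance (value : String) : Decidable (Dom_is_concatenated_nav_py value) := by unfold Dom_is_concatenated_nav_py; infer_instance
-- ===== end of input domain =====

-- B replaces A's greedy prefix-stripping loop with a word-break dynamic program over
-- end positions (minimal token count per prefix); same return value, no speed claim.

-- ===== PORT A =====
-- the nav tokens, as char lists: "home","about","projects","project","work","portfolio",
-- "contact","resume","blog","menu","github","linkedin" (shared literal constant of both programs)
def navTokens : List (List Char) :=
  [['h','o','m','e'], ['a','b','o','u','t'], ['p','r','o','j','e','c','t','s'],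
   ['p','r','o','j','e','c','t'], ['w','o','r','k'], ['p','o','r','t','f','o','l','i','o'],
   ['c','o','n','t','a','c','t'], ['r','e','s','u','m','e'], ['b','l','o','g'],
   ['m','e','n','u'], ['g','i','t','h','u','b'], ['l','i','n','k','e','d','i','n']]

-- every token is nonempty (cited by navLoopA's termination proof)
theorem navTokens_pos : ∀ t ∈ navTokens, 0 < t.length := by decide

-- A's while loop: `next((token for token in tokens if remaining.startswith(token)), "")`
-- is the first token that is a prefix of `remaining` (List.find?); empty match → False.
def navLoopA (remaining : List Char) (hits : Nat) : Bool :=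
  if _hrem : remaining.isEmpty then decide (hits ≥ 2)
  else
    match hm : navTokens.find? (fun t => t.isPrefixOf remaining) with
    | none => false
    | some m => navLoopA (remaining.drop m.length) (hits + 1)
termination_by remaining.length
decreasing_by
  have h1 := navTokens_pos m (List.mem_of_find?_eq_some hm)
  have h2 : remaining ≠ [] := by
    intro h; rw [h] at _hrem; simp at _hrem
  have h3 : 0 < remaining.length := List.length_pos_of_ne_nil h2
  simp only [List.length_drop]
  omega

def is_concatenated_nav_py (value : String) : Bool :=
  let cs := value.toList
  if cs.isEmpty || decide (cs.length > 80) then false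
  else navLoopA cs 0

-- ===== PORT B =====
-- inner loop over the tokens: best = min over tokens t with value[i-L:i] == t and dp[i-L] set
-- (value[i-L:i] with 0 ≤ i-L ≤ i ≤ n is exactly (cs.drop (i-L)).take L)
def navBest (cs : List Char) (dp : List (Option Nat)) (i : Nat) : Option Nat :=
  navTokens.foldl (fun best t =>
    let L := t.length
    if L ≤ i ∧ (cs.drop (i - L)).take L = t then
      match dp.getD (i - L) none with
      | none => best
      | some prev =>
        let cand := prev + 1
        match best with
        | none => some cand
        | some b => if cand < b then some cand else best
    else best) none

def is_concatenated_nav_py_alt (value : String) : Bool :=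
  let cs := value.toList
  if cs.isEmpty || decide (cs.length > 80) then false
  else
    let dp := (List.range' 1 cs.length).foldl (fun dp i => dp ++ [navBest cs dp i]) [some 0]
    match dp.getD cs.length none with
    | none => false
    | some k => decide (k ≥ 2)

-- ===== PRECONDITION & SPEC =====
def Spec_is_concatenated_nav_py (value : String) (out : Bool) : Prop := out = is_concatenated_nav_py_alt value
instance (value : String) (out : Bool) : Decidable (Spec_is_concatenated_nav_py value out) := by unfold Spec_is_concatenated_nav_py; infer_instance

-- ===== CLAIM (what is proved, stated in full; the proofs are below) =====
def Claim_equal_is_concatenated_nav_py : Prop := ∀ (value : String), Dom_is_concatenated_nav_py value → Spec_is_concatenated_nav_py value (is_concatenated_nav_py value)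

-- ===== LEMMAS AND PROOFS =====

-- s is the concatenation of exactly k nav tokens
inductive NavSeg : List Char → Nat → Prop
  | nil : NavSeg [] 0
  | cons {t r k} (ht : t ∈ navTokens) (h : NavSeg r k) : NavSeg (t ++ r) (k + 1)

-- the only proper prefix pair among the tokens is project <+: projects
theorem tok_pref : ∀ t1 ∈ navTokens, ∀ t2 ∈ navTokens, t1 <+: t2 →
    t1 = t2 ∨ (t1 = ['p','r','o','j','e','c','t'] ∧ t2 = ['p','r','o','j','e','c','t','s']) := by
  decide

theorem tok_head : ∀ t ∈ navTokens, t.head? ≠ some 's' := by decide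

theorem navseg_nil_eq {s : List Char} {k : Nat} (h : NavSeg s k) (hs : s = []) : k = 0 := by
  cases h with
  | nil => rfl
  | cons ht h' =>
    exfalso
    rename_i t r k'
    have h1 := navTokens_pos t ht
    have h2 : t = [] := (List.append_eq_nil_iff.mp hs).1
    rw [h2] at h1
    simp at h1

theorem navseg_zero_nil {s : List Char} (h : NavSeg s 0) : s = [] := by
  cases h with
  | nil => rfl

theorem navseg_no_s {s : List Char} {k : Nat} (h : NavSeg s k) : ∀ r, s = 's' :: r → False := by
  cases h with
  | nil => intro r hr; simp at hr
  | cons ht h' =>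
    rename_i t r0 k'
    intro r hr
    cases t with
    | nil =>
      have h1 := navTokens_pos _ ht
      simp at h1
    | cons c cs =>
      have hc : c = 's' := by simpa using congrArg List.head? hr
      exact tok_head _ ht (by simp [hc])

theorem navseg_cons_inv {s : List Char} {k : Nat} (h : NavSeg s k) (hne : s ≠ []) :
    ∃ t r k', t ∈ navTokens ∧ s = t ++ r ∧ k = k' + 1 ∧ NavSeg r k' := by
  cases h with
  | nil => exact absurd rfl hne
  | cons ht h' => exact ⟨_, _, _, ht, rfl, rfl, h'⟩

theorem projects_eq : (['p','r','o','j','e','c','t','s'] : List Char) = ['p','r','o','j','e','c','t'] ++ ['s'] := by decide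

theorem navseg_unique : ∀ n s j k, s.length ≤ n → NavSeg s j → NavSeg s k → j = k := by
  intro n
  induction n with
  | zero =>
    intro s j k hl h1 h2
    have hs : s = [] := by cases s <;> simp_all
    rw [navseg_nil_eq h1 hs, navseg_nil_eq h2 hs]
  | succ n ih =>
    intro s j k hl h1 h2
    by_cases hs : s = []
    · rw [navseg_nil_eq h1 hs, navseg_nil_eq h2 hs]
    · obtain ⟨t1, r1, j', ht1, he1, hj, hr1⟩ := navseg_cons_inv h1 hs
      obtain ⟨t2, r2, k', ht2, he2, hk, hr2⟩ := navseg_cons_inv h2 hs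
      have hp1 : t1 <+: s := ⟨r1, he1.symm⟩
      have hp2 : t2 <+: s := ⟨r2, he2.symm⟩
      have key : t1 = t2 := by
        rcases List.prefix_or_prefix_of_prefix hp1 hp2 with hc | hc
        · rcases tok_pref t1 ht1 t2 ht2 hc with h | ⟨e1, e2⟩
          · exact h
          · -- t1 = project, t2 = projects: r1 begins with 's', impossible
            exfalso
            rw [he2, e2, projects_eq, List.append_assoc] at he1
            rw [e1] at he1
            have : r1 = 's' :: r2 := by simpa using (List.append_cancel_left he1).symm
            exact navseg_no_s hr1 r2 this
        · rcases tok_pref t2 ht2 t1 ht1 hc with h | ⟨e1, e2⟩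
          · exact h.symm
          · exfalso
            rw [he1, e2, projects_eq, List.append_assoc] at he2
            rw [e1] at he2
            have : r2 = 's' :: r1 := by simpa using (List.append_cancel_left he2).symm
            exact navseg_no_s hr2 r1 this
      subst key
      have hr : r1 = r2 := by
        rw [he2] at he1
        exact (List.append_cancel_left he1).symm
      subst hr
      have hlen : r1.length ≤ n := by
        have := navTokens_pos t1 ht1
        have : s.length = t1.length + r1.length := by rw [he1]; simp
        omega
      rw [hj, hk, ih r1 j' k' hlen hr1 hr2]

-- if "projects" is a prefix of s, A's find? picks exactly "projects"
theorem find_projects {s : List Char} (hp : (['p','r','o','j','e','c','t','s'] : List Char) <+: s) :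
    navTokens.find? (fun t => t.isPrefixOf s) = some ['p','r','o','j','e','c','t','s'] := by
  have nh : ¬ ((['h','o','m','e'] : List Char).isPrefixOf s = true) := by
    rw [List.isPrefixOf_iff_prefix]
    intro hh
    rcases List.prefix_or_prefix_of_prefix hh hp with h | h
    · exact absurd h (by decide)
    · exact absurd h (by decide)
  have na : ¬ ((['a','b','o','u','t'] : List Char).isPrefixOf s = true) := by
    rw [List.isPrefixOf_iff_prefix]
    intro hh
    rcases List.prefix_or_prefix_of_prefix hh hp with h | h
    · exact absurd h (by decide)
    · exact absurd h (by decide)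
  have np : (['p','r','o','j','e','c','t','s'] : List Char).isPrefixOf s = true :=
    List.isPrefixOf_iff_prefix.mpr hp
  show List.find? (fun t : List Char => t.isPrefixOf s) (_ :: _ :: _ :: _) = _
  rw [List.find?_cons_of_neg (p := fun t : List Char => t.isPrefixOf s) nh,
      List.find?_cons_of_neg (p := fun t : List Char => t.isPrefixOf s) na,
      List.find?_cons_of_pos (p := fun t : List Char => t.isPrefixOf s) np]

theorem find?_of_prefix {s t : List Char} (ht : t ∈ navTokens) (hp : t <+: s) :
    ∃ m, navTokens.find? (fun t => t.isPrefixOf s) = some m := by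
  cases hf : navTokens.find? (fun t => t.isPrefixOf s) with
  | none =>
    exfalso
    exact (List.find?_eq_none.mp hf t ht) (by simpa [List.isPrefixOf_iff_prefix] using hp)
  | some m => exact ⟨m, rfl⟩

theorem loopA_of_seg : ∀ n s k, s.length ≤ n → NavSeg s k →
    ∀ hits, navLoopA s hits = decide (hits + k ≥ 2) := by
  intro n
  induction n with
  | zero =>
    intro s k hl hseg hits
    have hs : s = [] := by cases s <;> simp_all
    subst hs
    rw [navseg_nil_eq hseg rfl, navLoopA]
    simp
  | succ n ih =>
    intro s k hl hseg hits
    by_cases hs : s = []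
    · subst hs
      rw [navseg_nil_eq hseg rfl, navLoopA]
      simp
    · obtain ⟨t, r, k', ht, he, hk, hr⟩ := navseg_cons_inv hseg hs
      rw [navLoopA]
      rw [dif_neg (by simp [hs])]
      obtain ⟨m, hm⟩ := find?_of_prefix ht ⟨r, he.symm⟩
      split
      · rename_i heq; rw [heq] at hm; exact absurd hm (by simp)
      · rename_i m' heq
        have hmtok := List.mem_of_find?_eq_some heq
        have hmp : m' <+: s := by
          have h0 := List.find?_some heq
          simpa [List.isPrefixOf_iff_prefix] using h0
        have htp : t <+: s := ⟨r, he.symm⟩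
        have hmt : m' = t := by
          rcases List.prefix_or_prefix_of_prefix hmp htp with hc | hc
          · rcases tok_pref m' hmtok t ht hc with h | ⟨e1, e2⟩
            · exact h
            · -- m = project, t = projects: find? would have picked projects first
              exfalso
              have := find_projects (s := s) (by rw [← e2]; exact htp)
              rw [heq, e1] at this
              exact absurd this (by simp)
          · rcases tok_pref t ht m' hmtok hc with h | ⟨e1, e2⟩
            · exact h.symm
            · -- m = projects, t = project: r would begin with 's'
              exfalso
              obtain ⟨u, hu⟩ := hmp
              rw [he, e1] at hu
              rw [e2, projects_eq, List.append_assoc] at hu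
              have : r = 's' :: u := List.append_cancel_left hu.symm
              exact navseg_no_s hr u this
        rw [hmt, he, List.drop_left]
        have hlen : r.length ≤ n := by
          have h1 := navTokens_pos t ht
          have h2 : s.length = t.length + r.length := by rw [he]; simp
          omega
        rw [ih r k' hlen hr (hits + 1), hk]
        rw [decide_eq_decide]
        omega

theorem loopA_none : ∀ n s, s.length ≤ n → (∀ k, ¬ NavSeg s k) →
    ∀ hits, navLoopA s hits = false := by
  intro n
  induction n with
  | zero =>
    intro s hl hns hits
    have hs : s = [] := by cases s <;> simp_all
    exact absurd (hs ▸ NavSeg.nil) (hns 0)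
  | succ n ih =>
    intro s hl hns hits
    by_cases hs : s = []
    · exact absurd (hs ▸ NavSeg.nil) (hns 0)
    · rw [navLoopA]
      rw [dif_neg (by simp [hs])]
      split
      · rfl
      · rename_i m heq
        have hmtok := List.mem_of_find?_eq_some heq
        have hmp : m <+: s := by
          have h0 := List.find?_some heq
          simpa [List.isPrefixOf_iff_prefix] using h0
        obtain ⟨u, hu⟩ := hmp
        have hdrop : s.drop m.length = u := by rw [← hu, List.drop_left]
        rw [hdrop]
        have hns' : ∀ k, ¬ NavSeg u k := by
          intro k hk
          exact hns (k + 1) (hu ▸ NavSeg.cons hmtok hk)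
        have hlen : u.length ≤ n := by
          have h1 := navTokens_pos m hmtok
          have h2 : s.length = m.length + u.length := by rw [← hu]; simp
          omega
        exact ih u hlen hns' (hits + 1)

theorem seg_snoc {r : List Char} {k : Nat} (h : NavSeg r k) {t : List Char} (ht : t ∈ navTokens) :
    NavSeg (r ++ t) (k + 1) := by
  induction h with
  | nil => simpa using NavSeg.cons ht NavSeg.nil
  | cons ht' h' ih => rw [List.append_assoc]; exact NavSeg.cons ht' ih

theorem seg_unsnoc : ∀ {s : List Char} {k : Nat}, NavSeg s k → 0 < k →
    ∃ r t, t ∈ navTokens ∧ s = r ++ t ∧ NavSeg r (k - 1) := by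
  intro s k h
  induction h with
  | nil => intro h0; exact absurd h0 (by omega)
  | @cons t r k' ht h' ih =>
    intro _
    by_cases hk : 0 < k'
    · obtain ⟨r', t', ht', heq, hr'⟩ := ih hk
      refine ⟨t ++ r', t', ht', by rw [heq, List.append_assoc], ?_⟩
      have h1 : k' - 1 + 1 = k' := by omega
      have := NavSeg.cons ht hr'
      rw [h1] at this
      simpa using this
    · have hk0 : k' = 0 := by omega
      subst hk0
      have : r = [] := navseg_zero_nil h'
      subst this
      exact ⟨[], t, ht, by simp, NavSeg.nil⟩

theorem getD_concat_self {α : Type} (l : List α) (x d : α) : (l ++ [x]).getD l.length d = x := by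
  simp

-- the token fold of navBest: every produced value is a valid segmentation count of cs.take i
theorem navBest_fold_sound (cs : List Char) (dp : List (Option Nat)) (i : Nat)
    (hdp : ∀ j k, j < i → (dp.getD j none = some k ↔ NavSeg (cs.take j) k)) :
    ∀ (l : List (List Char)), (∀ t ∈ l, t ∈ navTokens) → ∀ (best : Option Nat),
      (∀ k, best = some k → NavSeg (cs.take i) k) →
      ∀ k, (l.foldl (fun best t =>
        let L := t.length
        if L ≤ i ∧ (cs.drop (i - L)).take L = t then
          match dp.getD (i - L) none with
          | none => best
          | some prev =>
            let cand := prev + 1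
            match best with
            | none => some cand
            | some b => if cand < b then some cand else best
        else best) best) = some k → NavSeg (cs.take i) k := by
  intro l
  induction l with
  | nil => intro _ best hbest k hk; exact hbest k hk
  | cons t l' ih =>
    intro hsub best hbest k
    simp only [List.foldl_cons]
    apply ih (fun t ht => hsub t (List.mem_cons_of_mem _ ht))
    -- the new accumulator is sound
    intro k' hk'
    split at hk'
    · rename_i hcond
      obtain ⟨hL, hslice⟩ := hcond
      have httok : t ∈ navTokens := hsub t List.mem_cons_self
      have hLpos := navTokens_pos t httok
      have hsplit : cs.take i = cs.take (i - t.length) ++ t := by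
        have : i - t.length + t.length = i := by omega
        rw [← this, List.take_add, hslice, this]
      split at hk'
      · exact hbest k' hk'
      · rename_i prev hprev
        have hseg : NavSeg (cs.take (i - t.length)) prev :=
          (hdp (i - t.length) prev (by omega)).mp hprev
        have hcand : NavSeg (cs.take i) (prev + 1) := by
          rw [hsplit]; exact seg_snoc hseg httok
        split at hk'
        · injection hk' with h; subst h; exact hcand
        · rename_i b _
          split at hk'
          · injection hk' with h; subst h; exact hcand
          · exact hbest k' hk'
    · exact hbest k' hk'

-- the fold never loses a some accumulator
theorem navBest_fold_mono (cs : List Char) (dp : List (Option Nat)) (i : Nat) :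
    ∀ (l : List (List Char)) (best : Option Nat), best ≠ none → (l.foldl (fun best t =>
        let L := t.length
        if L ≤ i ∧ (cs.drop (i - L)).take L = t then
          match dp.getD (i - L) none with
          | none => best
          | some prev =>
            let cand := prev + 1
            match best with
            | none => some cand
            | some b => if cand < b then some cand else best
        else best) best) ≠ none := by
  intro l
  induction l with
  | nil => intro best h; exact h
  | cons t l' ih =>
    intro best hb
    simp only [List.foldl_cons]
    apply ih
    dsimp only
    split
    · split
      · exact hb
      · split
        · simp
        · split <;> simp_all
    · exact hb

-- if some token closes a segmentation of cs.take i, the fold returns a some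
theorem navBest_fold_complete (cs : List Char) (dp : List (Option Nat)) (i : Nat)
    {t0 : List Char} (hcond : t0.length ≤ i ∧ (cs.drop (i - t0.length)).take t0.length = t0)
    {prev0 : Nat} (hprev : dp.getD (i - t0.length) none = some prev0) :
    ∀ (l : List (List Char)) (best : Option Nat), t0 ∈ l → (l.foldl (fun best t =>
        let L := t.length
        if L ≤ i ∧ (cs.drop (i - L)).take L = t then
          match dp.getD (i - L) none with
          | none => best
          | some prev =>
            let cand := prev + 1
            match best with
            | none => some cand
            | some b => if cand < b then some cand else best
        else best) best) ≠ none := by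
  intro l
  induction l with
  | nil => intro best h; simp at h
  | cons t l' ih =>
    intro best hmem
    simp only [List.foldl_cons]
    rcases List.mem_cons.mp hmem with heq | hmem'
    · subst heq
      apply navBest_fold_mono
      dsimp only
      rw [if_pos hcond, hprev]
      cases best with
      | none => simp
      | some b => dsimp only; split <;> simp
    · exact ih _ hmem'

theorem navBest_iff (cs : List Char) (dp : List (Option Nat)) (i : Nat)
    (hi1 : 1 ≤ i) (hi2 : i ≤ cs.length)
    (hdp : ∀ j k, j < i → (dp.getD j none = some k ↔ NavSeg (cs.take j) k)) :
    ∀ k, navBest cs dp i = some k ↔ NavSeg (cs.take i) k := by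
  intro k
  constructor
  · intro h
    exact navBest_fold_sound cs dp i hdp navTokens (fun _ ht => ht) none (by simp) k h
  · intro hseg
    -- k is positive since cs.take i is nonempty
    have hne : cs.take i ≠ [] := by
      intro h
      have h2 : min i cs.length = 0 := by
        have := congrArg List.length h
        rwa [List.length_take] at this
      omega
    have hkpos : 0 < k := by
      rcases Nat.eq_zero_or_pos k with h | h
      · exact absurd (navseg_zero_nil (h ▸ hseg)) hne
      · exact h
    obtain ⟨r, t, ht, hsplit, hr⟩ := seg_unsnoc hseg hkpos
    have hlent : (cs.take i).length = i := by rw [List.length_take]; omega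
    have hlensum : r.length + t.length = i := by
      have := congrArg List.length hsplit
      simp at this; omega
    have hLpos := navTokens_pos t ht
    have hL : t.length ≤ i := by omega
    have hrtake : r = cs.take (i - t.length) := by
      have hpr : r <+: cs := List.IsPrefix.trans ⟨t, hsplit.symm⟩ (List.take_prefix i cs)
      have := List.prefix_iff_eq_take.mp hpr
      rw [this]
      congr 1
      omega
    have hslice : (cs.drop (i - t.length)).take t.length = t := by
      have h1 : i - t.length + t.length = i := by omega
      have h2 : cs.take i = cs.take (i - t.length) ++ (cs.drop (i - t.length)).take t.length := by
        rw [← List.take_add, h1]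
      rw [hsplit, hrtake] at h2
      exact (List.append_cancel_left h2).symm
    have hprev : dp.getD (i - t.length) none = some (k - 1) := by
      apply (hdp (i - t.length) (k - 1) (by omega)).mpr
      rw [← hrtake]; exact hr
    have hnn := navBest_fold_complete cs dp i ⟨hL, hslice⟩ hprev navTokens none ht
    cases hbb : navBest cs dp i with
    | none => exact absurd (show _ = none from hbb) hnn
    | some k' =>
      have hseg' : NavSeg (cs.take i) k' :=
        navBest_fold_sound cs dp i hdp navTokens (fun _ ht => ht) none (by simp) k'
          (show _ = some k' from hbb)
      exact congrArg some (navseg_unique (cs.take i).length (cs.take i) k' k le_rfl hseg' hseg)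

theorem dp_inv (cs : List Char) : ∀ j, j ≤ cs.length →
    ((List.range' 1 j).foldl (fun dp i => dp ++ [navBest cs dp i]) [some 0]).length = j + 1 ∧
    ∀ i k, i ≤ j →
      (((List.range' 1 j).foldl (fun dp i => dp ++ [navBest cs dp i]) [some 0]).getD i none = some k
        ↔ NavSeg (cs.take i) k) := by
  intro j
  induction j with
  | zero =>
    intro _
    refine ⟨by simp, ?_⟩
    intro i k hi
    have : i = 0 := by omega
    subst this
    simp only [List.range'_zero, List.foldl_nil, List.take_zero]
    constructor
    · intro h
      have h2 : (0 : Nat) = k := by simpa using h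
      subst h2; exact NavSeg.nil
    · intro h
      have hk := navseg_nil_eq h rfl
      subst hk; rfl
  | succ j ih =>
    intro hj
    obtain ⟨ihlen, ihiff⟩ := ih (by omega)
    have hconcat : List.range' 1 (j + 1) = List.range' 1 j ++ [j + 1] := by
      rw [List.range'_concat]; simp [Nat.add_comm]
    set dp := (List.range' 1 j).foldl (fun dp i => dp ++ [navBest cs dp i]) [some 0] with hdpdef
    have hstep : (List.range' 1 (j + 1)).foldl (fun dp i => dp ++ [navBest cs dp i]) [some 0]
        = dp ++ [navBest cs dp (j + 1)] := by
      rw [hconcat, List.foldl_append]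
      simp only [List.foldl_cons, List.foldl_nil]
      rw [← hdpdef]
    rw [hstep]
    refine ⟨by simp [ihlen], ?_⟩
    intro i k hi
    rcases Nat.lt_or_ge i (j + 1) with hlt | hge
    · rw [List.getD_append _ _ _ _ (by omega)]
      exact ihiff i k (by omega)
    · have hieq : i = j + 1 := by omega
      subst hieq
      have : (dp ++ [navBest cs dp (j + 1)]).getD (j + 1) none = navBest cs dp (j + 1) := by
        have := getD_concat_self dp (navBest cs dp (j + 1)) none
        rwa [ihlen] at this
      rw [this]
      exact navBest_iff cs dp (j + 1) (by omega) hj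
        (fun j' k' hj' => ihiff j' k' (by omega)) k

-- ===== VERDICT (by name: the statement is the Claim_ definition above) =====
theorem is_concatenated_nav_py_spec : Claim_equal_is_concatenated_nav_py := by
  unfold Claim_equal_is_concatenated_nav_py Spec_is_concatenated_nav_py
  intro value _
  unfold is_concatenated_nav_py is_concatenated_nav_py_alt
  set cs := value.toList with hcs
  by_cases hg : (cs.isEmpty || decide (cs.length > 80)) = true
  · simp only [hg, if_true]
  · simp only [hg, if_false, Bool.false_eq_true]
    obtain ⟨hlen, hiff⟩ := dp_inv cs cs.length le_rfl
    cases hdn : ((List.range' 1 cs.length).foldl (fun dp i => dp ++ [navBest cs dp i]) [some 0]).getD cs.length none with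
    | none =>
      have hns : ∀ k, ¬ NavSeg cs k := by
        intro k hk
        have := (hiff cs.length k le_rfl).mpr (by rwa [List.take_length])
        rw [hdn] at this
        exact absurd this (by simp)
      rw [loopA_none cs.length cs le_rfl hns 0]
    | some k =>
      have hseg : NavSeg cs k := by
        have := (hiff cs.length k le_rfl).mp hdn
        rwa [List.take_length] at this
      rw [loopA_of_seg cs.length cs k le_rfl hseg 0]
      simp
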